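-- pv_equiv track=rewrite | github.com/monstercleaning/gsc | scripts/phase3_make_sigmatensor_candidate_dossier_pack.py | _flag_value
-- ===== SOURCE A (Python) =====
-- from typing import Any, Dict, Iterable, List, Mapping, Optional, Sequence, Tuple
--
-- def _flag_value(tokens: Sequence[str], flag: str) -> Optional[str]:
--     out: Optional[str] = None
--     for i, token in enumerate(tokens):
--         if str(token) != str(flag):
--             continue
--         if i + 1 >= len(tokens):
--             continue
--         out = str(tokens[i + 1])
--     return out
-- ===== SOURCE B (Python) =====
-- def _flag_value(tokens, flag):
--     f = str(flag)
--     for a, b in reversed(list(zip(tokens, tokens[1:]))):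
--         if str(a) == f:
--             return str(b)
--     return None
-- ===== Notes on version B (the rewrite author's own statement) =====
-- stated objective: alternative
-- what changed: Replaces the forward index-based accumulator loop (overwriting 'out' on each qualifying match) with zipping adjacent token pairs and scanning the reversed pair list for the first match, returning early.
import Mathlib
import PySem

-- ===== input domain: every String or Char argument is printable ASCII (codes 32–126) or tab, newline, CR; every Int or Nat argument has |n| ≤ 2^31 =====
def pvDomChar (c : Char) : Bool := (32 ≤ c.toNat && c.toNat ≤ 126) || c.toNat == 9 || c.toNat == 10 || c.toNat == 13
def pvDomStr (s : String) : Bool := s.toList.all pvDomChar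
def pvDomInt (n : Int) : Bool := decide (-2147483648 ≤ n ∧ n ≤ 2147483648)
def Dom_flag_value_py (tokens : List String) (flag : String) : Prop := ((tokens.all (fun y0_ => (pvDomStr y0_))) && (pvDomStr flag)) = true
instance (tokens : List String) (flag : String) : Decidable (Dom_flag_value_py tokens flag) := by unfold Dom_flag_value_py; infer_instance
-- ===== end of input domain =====

-- B replaces A's forward loop with an accumulator by a first-match scan over the reversed list
-- of adjacent token pairs (objective: alternative decomposition; same return value everywhere).

-- ===== PORT A =====
-- for i, token in enumerate(tokens): if token != flag: continue; if i+1 >= len: continue; out = tokens[i+1]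
-- (str() on str arguments is the identity; tokens[i+1] is in range inside the guard, so pyGet? is some there)
def flag_value_py (tokens : List String) (flag : String) : Option String :=
  (PySem.List.enumerate tokens 0).foldl
    (fun out p =>
      if p.2 ≠ flag then out
      else if p.1 + 1 ≥ (tokens.length : Int) then out
      else PySem.List.pyGet? tokens (p.1 + 1))
    none

-- ===== PORT B =====
-- for a, b in reversed(list(zip(tokens, tokens[1:]))): if a == f: return b
def flagGoB (flag : String) : List (String × String) → Option String
  | [] => none
  | p :: rest => if p.1 = flag then some p.2 else flagGoB flag rest

def flag_value_py_alt (tokens : List String) (flag : String) : Option String :=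
  flagGoB flag ((tokens.zip (tokens.drop 1)).reverse)

-- ===== PRECONDITION & SPEC =====
def Spec_flag_value_py (tokens : List String) (flag : String) (out : Option String) : Prop := out = flag_value_py_alt tokens flag
instance (tokens : List String) (flag : String) (out : Option String) : Decidable (Spec_flag_value_py tokens flag out) := by unfold Spec_flag_value_py; infer_instance

-- ===== CLAIM (what is proved, stated in full; the proofs are below) =====
def Claim_equal_flag_value_py : Prop := ∀ (tokens : List String) (flag : String), Dom_flag_value_py tokens flag → Spec_flag_value_py tokens flag (flag_value_py tokens flag)

-- ===== LEMMAS AND PROOFS =====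

-- B's scan is findSome? of the "pair matches the flag" function.
theorem flagGoB_eq_findSome? (flag : String) (l : List (String × String)) :
    flagGoB flag l = l.findSome? (fun p => if p.1 = flag then some p.2 else none) := by
  induction l with
  | nil => rfl
  | cons p rest ih =>
      simp only [flagGoB, List.findSome?_cons]
      split_ifs <;> simp_all

-- A last-match foldl equals a first-match scan of the reversed list.
theorem foldl_lastmatch {α β : Type} (f : α → Option β) :
    ∀ (l : List α) (init : Option β),
      l.foldl (fun out x => (f x).or out) init = (l.reverse.findSome? f).or init := by
  intro l
  induction l with
  | nil => intro init; simp
  | cons x rest ih =>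
      intro init
      simp only [List.foldl_cons, List.reverse_cons, List.findSome?_append, ih]
      cases h : rest.reverse.findSome? f <;> cases hf : f x <;> simp [List.findSome?, hf, Option.or]

-- A's enumerate-and-index fold equals the same last-match fold over the adjacent-pair list.
theorem aFold_eq_pairs (tokens : List String) (flag : String) :
    ∀ (suf : List String) (s : Nat) (init : Option String),
      tokens.drop s = suf →
      (PySem.List.enumerate suf (s : Int)).foldl
        (fun out p =>
          if p.2 ≠ flag then out
          else if p.1 + 1 ≥ (tokens.length : Int) then out
          else PySem.List.pyGet? tokens (p.1 + 1))
        init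
      = (suf.zip (suf.drop 1)).foldl
          (fun out p => ((fun q : String × String => if q.1 = flag then some q.2 else none) p).or out)
          init := by
  intro suf
  induction suf with
  | nil => intro s init _; simp [PySem.List.enumerate]
  | cons x rest ih =>
      intro s init hdrop
      have hs : s ≤ tokens.length := by
        by_contra h
        have : tokens.drop s = [] := List.drop_eq_nil_of_le (by omega)
        rw [hdrop] at this; simp at this
      have hlen : tokens.length = s + rest.length + 1 := by
        have h1 : (tokens.drop s).length = tokens.length - s := List.length_drop
        rw [hdrop] at h1
        simp only [List.length_cons] at h1
        omega
      have hdrop' : tokens.drop (s + 1) = rest := by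
        have h2 : (tokens.drop s).drop 1 = rest := by rw [hdrop]; simp
        rw [List.drop_drop] at h2
        simpa [Nat.add_comm] using h2
      rw [PySem.List.enumerate_cons, List.foldl_cons]
      cases rest with
      | nil =>
          have hguard : (s : Int) + 1 ≥ (tokens.length : Int) := by
            simp only [List.length_nil] at hlen; omega
          simp only [PySem.List.enumerate_nil, List.foldl_nil, List.drop_succ_cons,
            List.drop_nil, List.zip_nil_right]
          by_cases hx : x = flag
          · simp [hx, if_pos hguard]
          · simp [hx]
      | cons r rs =>
          have hnguard : ¬ ((s : Int) + 1 ≥ (tokens.length : Int)) := by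
            simp only [List.length_cons] at hlen; omega
          have hget : PySem.List.pyGet? tokens ((s : Int) + 1) = some r := by
            have hcast : (s : Int) + 1 = ((s + 1 : Nat) : Int) := by push_cast; ring
            rw [hcast, PySem.List.pyGet?_natCast]
            have hh : (tokens.drop (s+1)).head? = tokens[s+1]? := List.head?_drop
            rw [hdrop'] at hh
            exact hh.symm
          have hstep : (s : Int) + 1 = ((s + 1 : Nat) : Int) := by push_cast; ring
          rw [hstep, ih (s + 1) _ hdrop']
          simp only [List.drop_succ_cons, List.drop_zero, List.zip_cons_cons, List.foldl_cons]
          congr 1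
          by_cases hx : x = flag
          · rw [← hstep]
            simp [hx, if_neg hnguard, hget, Option.or]
          · simp [hx, Option.or]

-- ===== VERDICT (by name: the statement is the Claim_ definition above) =====
theorem flag_value_py_spec : Claim_equal_flag_value_py := by
  intro tokens flag _
  unfold Spec_flag_value_py flag_value_py flag_value_py_alt
  have h := aFold_eq_pairs tokens flag tokens 0 none (by simp)
  simp only [Nat.cast_zero] at h
  rw [h, foldl_lastmatch, flagGoB_eq_findSome?]
  simp only [List.drop_one]
  generalize List.findSome? (fun p => if p.1 = flag then some p.2 else none)
      ((tokens.zip tokens.tail).reverse) = z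
  cases z <;> rfl
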